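-- pv_equiv track=rewrite | github.com/VuQuynh27/Converting-NFA-to-DFA-and-DFA-minimizing | eNfatoDfa.py | newStates
-- ===== SOURCE A (Python) =====
-- def newStates(states):
--     x = len(states)
--     temp_new_states2=[]
--     new_dict=dict()
--     new_states=[]
--     for i in range(1 << x):
--         temp_new_states2.append([states[j] for j in range(x) if (i & (1 << j))])
--     count=0
--     for i in temp_new_states2:
--         new_dict.update({'q' + str(count): i})
--         count += 1
--     for j in new_dict:
--       new_states.append(j)
--     return new_dict,temp_new_states2,new_states
-- ===== SOURCE B (Python) =====
-- def newStates(states):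
--     subsets = [[]]
--     for s in states:
--         subsets = subsets + [sub + [s] for sub in subsets]
--     new_dict = {'q' + str(k): sub for k, sub in enumerate(subsets)}
--     new_states = list(new_dict)
--     return new_dict, subsets, new_states
-- ===== Notes on version B (the rewrite author's own statement) =====
-- stated objective: simpler
-- what changed: B builds the powerset by incremental doubling (subsets = subsets + [sub+[s] for sub in subsets]) instead of A's bit-mask enumeration over range(1<<n), and replaces A's counter-driven dict-update loop and separate key-collection loop by a single enumerate-based comprehension.
import Mathlib
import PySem

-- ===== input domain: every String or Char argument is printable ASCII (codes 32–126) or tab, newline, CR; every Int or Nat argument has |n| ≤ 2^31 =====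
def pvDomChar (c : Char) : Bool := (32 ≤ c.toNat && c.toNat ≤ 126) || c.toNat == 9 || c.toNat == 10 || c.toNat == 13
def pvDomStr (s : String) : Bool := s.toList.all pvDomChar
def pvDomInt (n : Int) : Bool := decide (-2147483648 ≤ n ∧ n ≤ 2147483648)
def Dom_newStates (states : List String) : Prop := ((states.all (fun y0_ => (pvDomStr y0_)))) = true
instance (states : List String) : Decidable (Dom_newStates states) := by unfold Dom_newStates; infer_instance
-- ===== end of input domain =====

-- B replaces A's bit-mask enumeration of the powerset by incremental doubling and the
-- counter-driven dict fold by a single enumerate-map (objective: simpler; same output).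

-- ===== PORT A =====
def newStates (states : List String) : (List (String × List String)) × List (List String) × List String :=
  let x := states.length
  let temp_new_states2 :=
    (List.range (1 <<< x)).foldl
      (fun acc i =>
        acc ++ [(List.range x).filterMap
          (fun j => if i &&& (1 <<< j) ≠ 0 then states[j]? else none)]) []
  let dc :=
    temp_new_states2.foldl
      (fun (p : PySem.Dict String (List String) × Int) i =>
        (p.1.insert ("q" ++ PySem.Int.toStr p.2) i, p.2 + 1))
      (PySem.Dict.empty, 0)
  let new_states := dc.1.keys.foldl (fun acc j => acc ++ [j]) []
  (dc.1.items, temp_new_states2, new_states)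

-- ===== PORT B =====
def newStates_alt (states : List String) : (List (String × List String)) × List (List String) × List String :=
  let subsets := states.foldl (fun acc s => acc ++ acc.map (fun sub => sub ++ [s])) [[]]
  let new_dict := (PySem.List.enumerate subsets).map (fun p => ("q" ++ PySem.Int.toStr p.1, p.2))
  let new_states := new_dict.map (fun p => p.1)
  (new_dict, subsets, new_states)

-- ===== PRECONDITION & SPEC =====
def Spec_newStates (states : List String) (out : (List (String × List String)) × List (List String) × List String) : Prop := out = newStates_alt states
instance (states : List String) (out : (List (String × List String)) × List (List String) × List String) : Decidable (Spec_newStates states out) := by unfold Spec_newStates; infer_instance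

-- ===== CLAIM (what is proved, stated in full; the proofs are below) =====
def Claim_equal_newStates : Prop := ∀ (states : List String), Dom_newStates states → Spec_newStates states (newStates states)

-- ===== LEMMAS AND PROOFS =====

-- A's subset-of-mask comprehension, named for the proofs below.
def pvRow (l : List String) (i : Nat) : List String :=
  (List.range l.length).filterMap (fun j => if i &&& (1 <<< j) ≠ 0 then l[j]? else none)

theorem pvRow_append_lt (l : List String) (s : String) (i : Nat) (h : i < 2 ^ l.length) :
    pvRow (l ++ [s]) i = pvRow l i := by
  unfold pvRow
  rw [List.length_append, List.length_singleton, List.range_succ, List.filterMap_append]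
  have h1 : (List.range l.length).filterMap
      (fun j => if i &&& (1 <<< j) ≠ 0 then (l ++ [s])[j]? else none) =
      (List.range l.length).filterMap (fun j => if i &&& (1 <<< j) ≠ 0 then l[j]? else none) := by
    refine List.filterMap_congr (fun j hj => ?_)
    rw [List.mem_range] at hj
    rw [List.getElem?_append_left hj]
  have h2 : i &&& (1 <<< l.length) = 0 := by
    rw [Nat.one_shiftLeft, Nat.and_two_pow, Nat.testBit_lt_two_pow h]
    simp
  rw [h1]
  simp [h2]

theorem pvRow_append_ge (l : List String) (s : String) (i : Nat) (h : i < 2 ^ l.length) :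
    pvRow (l ++ [s]) (2 ^ l.length + i) = pvRow l i ++ [s] := by
  unfold pvRow
  rw [List.length_append, List.length_singleton, List.range_succ, List.filterMap_append]
  have h1 : (List.range l.length).filterMap
      (fun j => if (2 ^ l.length + i) &&& (1 <<< j) ≠ 0 then (l ++ [s])[j]? else none) =
      (List.range l.length).filterMap (fun j => if i &&& (1 <<< j) ≠ 0 then l[j]? else none) := by
    refine List.filterMap_congr (fun j hj => ?_)
    rw [List.mem_range] at hj
    rw [List.getElem?_append_left hj, Nat.one_shiftLeft, Nat.and_two_pow, Nat.and_two_pow,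
      Nat.testBit_two_pow_add_gt hj]
  have h2 : (2 ^ l.length + i) &&& (1 <<< l.length) ≠ 0 := by
    rw [Nat.one_shiftLeft, Nat.and_two_pow, Nat.testBit_two_pow_add_eq,
      Nat.testBit_lt_two_pow h]
    simp
  rw [h1]
  simp [h2]

-- bit-mask enumeration = incremental doubling
theorem pvPowerset_eq (l : List String) :
    (List.range (1 <<< l.length)).map (pvRow l) =
    l.foldl (fun acc s => acc ++ acc.map (fun sub => sub ++ [s])) [[]] := by
  induction l using List.reverseRecOn with
  | nil => rfl
  | append_singleton l s ih =>
    rw [List.foldl_append, ← ih, List.foldl_cons, List.foldl_nil]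
    rw [List.length_append, List.length_singleton, Nat.one_shiftLeft, Nat.one_shiftLeft,
      pow_succ, mul_two, List.range_add, List.map_append, List.map_map]
    congr 1
    · refine List.map_congr_left (fun i hi => ?_)
      rw [List.mem_range] at hi
      exact pvRow_append_lt l s i hi
    · rw [List.map_map]
      refine List.map_congr_left (fun i hi => ?_)
      rw [List.mem_range] at hi
      exact pvRow_append_ge l s i hi

-- decimal digits, structurally (proof-side mirror of Nat.toDigits 10)
def pvDigits (n : Nat) : List Char :=
  if _h : n < 10 then [Nat.digitChar n]
  else pvDigits (n / 10) ++ [Nat.digitChar (n % 10)]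
  decreasing_by exact Nat.div_lt_self (by omega) (by norm_num)

theorem pvToDigitsCore_acc (fuel : Nat) : ∀ (n : Nat) (ds : List Char),
    Nat.toDigitsCore 10 fuel n ds = Nat.toDigitsCore 10 fuel n [] ++ ds := by
  induction fuel with
  | zero => intro n ds; simp [Nat.toDigitsCore]
  | succ f ih =>
    intro n ds
    simp only [Nat.toDigitsCore]
    by_cases h : n / 10 = 0
    · simp [h]
    · simp only [h, if_false]
      rw [ih (n / 10) (Nat.digitChar (n % 10) :: ds), ih (n / 10) [Nat.digitChar (n % 10)]]
      simp

theorem pvToDigitsCore_eq (fuel : Nat) : ∀ (n : Nat), 0 < fuel → n < 10 ^ fuel →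
    Nat.toDigitsCore 10 fuel n [] = pvDigits n := by
  induction fuel with
  | zero => intro n h; omega
  | succ f ih =>
    intro n _ hn
    simp only [Nat.toDigitsCore]
    by_cases h : n / 10 = 0
    · have h10 : n < 10 := by omega
      rw [pvDigits, dif_pos h10, Nat.mod_eq_of_lt h10]
      simp [h]
    · have h10 : ¬ n < 10 := by omega
      have hf : 0 < f := by
        by_contra hf0
        have : f = 0 := by omega
        subst this
        simp at hn
        omega
      simp only [h, if_false]
      rw [pvToDigitsCore_acc, ih (n / 10) hf (by rw [pow_succ] at hn; omega)]
      conv_rhs => rw [pvDigits]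
      rw [dif_neg h10]

theorem pvToDigits_eq (n : Nat) : Nat.toDigits 10 n = pvDigits n := by
  have : n < 10 ^ (n + 1) :=
    lt_of_lt_of_le (Nat.lt_pow_self (by norm_num)) (Nat.pow_le_pow_right (by norm_num) (by omega))
  exact pvToDigitsCore_eq (n + 1) n (by omega) this

def pvVal (cs : List Char) : Nat := cs.foldl (fun a c => a * 10 + (c.toNat - 48)) 0

theorem pvVal_foldl_digits (n : Nat) : ∀ (a : Nat),
    (pvDigits n).foldl (fun a c => a * 10 + (c.toNat - 48)) a = a * 10 ^ (pvDigits n).length + n := by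
  induction n using Nat.strong_induction_on with
  | _ n ih =>
    intro a
    by_cases h : n < 10
    · rw [pvDigits, dif_pos h]
      have : (Nat.digitChar n).toNat - 48 = n := by interval_cases n <;> decide
      simp [this]
    · rw [pvDigits, dif_neg h]
      rw [List.foldl_append]
      rw [ih (n / 10) (Nat.div_lt_self (by omega) (by norm_num)) a]
      have hm : (Nat.digitChar (n % 10)).toNat - 48 = n % 10 := by
        have : n % 10 < 10 := Nat.mod_lt _ (by norm_num)
        interval_cases hh : (n % 10) <;> decide
      simp only [List.foldl_cons, List.foldl_nil, List.length_append, List.length_singleton, hm]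
      rw [pow_succ]
      have := Nat.div_add_mod n 10
      ring_nf
      omega

theorem pvVal_digits (n : Nat) : pvVal (pvDigits n) = n := by
  unfold pvVal
  rw [pvVal_foldl_digits n 0]
  simp

theorem pvKey_inj (m n : Nat)
    (h : "q" ++ PySem.Int.toStr (m : Int) = "q" ++ PySem.Int.toStr (n : Int)) : m = n := by
  have hl : (("q" ++ PySem.Int.toStr (m : Int)).toList) = (("q" ++ PySem.Int.toStr (n : Int)).toList) := by
    rw [h]
  rw [String.toList_append, String.toList_append] at hl
  have hcs : (PySem.Int.toStr (m : Int)).toList = (PySem.Int.toStr (n : Int)).toList :=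
    List.append_cancel_left hl
  rw [PySem.Int.toList_toStr, PySem.Int.toList_toStr] at hcs
  unfold PySem.Int.toChars at hcs
  have hm : ¬ ((m : Int) < 0) := by omega
  have hn : ¬ ((n : Int) < 0) := by omega
  rw [if_neg hm, if_neg hn, Int.toNat_natCast, Int.toNat_natCast,
    pvToDigits_eq, pvToDigits_eq] at hcs
  have := congrArg pvVal hcs
  rwa [pvVal_digits, pvVal_digits] at this

-- A's counter-driven dict fold, re-indexed over zipIdx
theorem pvFoldA (l : List (List String)) : ∀ (d : PySem.Dict String (List String)) (c : Nat),
    l.foldl (fun (p : PySem.Dict String (List String) × Int) i =>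
        (p.1.insert ("q" ++ PySem.Int.toStr p.2) i, p.2 + 1)) (d, (c : Int)) =
    ((l.zipIdx c).foldl (fun d p => d.insert ("q" ++ PySem.Int.toStr (p.2 : Int)) p.1) d,
      ((c + l.length : Nat) : Int)) := by
  induction l with
  | nil => intro d c; simp
  | cons a t ih =>
    intro d c
    simp only [List.foldl_cons, List.zipIdx_cons]
    have h1 : ((c : Int) + 1) = (((c + 1 : Nat)) : Int) := by push_cast; ring
    rw [h1, ih]
    congr 1
    push_cast [List.length_cons]
    ring

theorem pvKeysZipIdx (l : List (List String)) : ∀ c : Nat,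
    (l.zipIdx c).map (fun p => "q" ++ PySem.Int.toStr (p.2 : Int)) =
    (List.range' c l.length).map (fun k : Nat => "q" ++ PySem.Int.toStr (k : Int)) := by
  induction l with
  | nil => intro c; rfl
  | cons a t ih => intro c; simp [List.range', ih]

theorem pvDictItems (l : List (List String)) :
    ((l.zipIdx 0).foldl (fun d p => d.insert ("q" ++ PySem.Int.toStr (p.2 : Int)) p.1)
        (PySem.Dict.empty : PySem.Dict String (List String))).items =
    (l.zipIdx).map (fun p => ("q" ++ PySem.Int.toStr (p.2 : Int), p.1)) := by
  rw [PySem.Dict.items_foldl_insert_fresh (l.zipIdx 0)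
      (fun p => "q" ++ PySem.Int.toStr (p.2 : Int)) Prod.fst PySem.Dict.empty
      (fun a _ => PySem.Dict.contains_empty _) ?_]
  · simp [PySem.Dict.empty]
  · rw [pvKeysZipIdx]
    have hg : Function.Injective (fun k : Nat => "q" ++ PySem.Int.toStr (k : Int)) :=
      fun m n h => pvKey_inj m n h
    exact (List.nodup_range' 1).map hg

-- ===== VERDICT (by name: the statement is the Claim_ definition above) =====
theorem newStates_spec : Claim_equal_newStates := by
  intro states _
  unfold Spec_newStates newStates newStates_alt
  simp only
  rw [PySem.List.foldl_append_singleton_eq_map]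
  have htemp : (List.range (1 <<< states.length)).map (pvRow states) =
      states.foldl (fun acc s => acc ++ acc.map (fun sub => sub ++ [s])) [[]] := pvPowerset_eq states
  unfold pvRow at htemp
  simp only [List.nil_append]
  rw [htemp]
  set subs := states.foldl (fun acc s => acc ++ acc.map (fun sub => sub ++ [s])) [[]] with hsubs
  have henum : (PySem.List.enumerate subs).map (fun p => ("q" ++ PySem.Int.toStr p.1, p.2)) =
      (subs.zipIdx).map (fun p => ("q" ++ PySem.Int.toStr (p.2 : Int), p.1)) := by
    rw [PySem.List.enumerate_eq_zipIdx_map, List.map_map]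
    exact List.map_congr_left (fun p _ => by simp)
  rw [henum]
  have h0 : (0 : Int) = ((0 : Nat) : Int) := rfl
  rw [h0, pvFoldA subs PySem.Dict.empty 0, pvDictItems subs]
  refine Prod.ext ?_ (Prod.ext rfl ?_)
  · rfl
  · simp only
    rw [PySem.List.foldl_append_singleton]
    simp only [List.nil_append]
    show (((subs.zipIdx 0).foldl (fun d p => d.insert ("q" ++ PySem.Int.toStr (p.2 : Int)) p.1)
        (PySem.Dict.empty : PySem.Dict String (List String))).items).map (·.1) =
      ((subs.zipIdx).map (fun p => ("q" ++ PySem.Int.toStr (p.2 : Int), p.1))).map (fun p => p.1)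
    rw [pvDictItems subs]
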